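-- pv_equiv track=rewrite | github.com/Sebastian-NM/Bingo-A-S | funcionalidades.py | juegoEnZ
-- ===== SOURCE A (Python) =====
-- def juegoEnZ(pCarton):
--     diagonalInversa = len(pCarton)
--     indiceA = 0
--     indiceB = 0
--
--     while(indiceA < len(pCarton)):
--         diagonalInversa = diagonalInversa - 1
--         while(indiceB < len(pCarton[indiceA])):
--             if(indiceA == 0 or indiceA == 4):
--                 if(pCarton[indiceA][indiceB] != "X"):
--                     return False
--             if(indiceB == diagonalInversa):
--                 if(pCarton[indiceA][indiceB] != "X"):
--                     return False
--             indiceB = indiceB + 1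
--
--         indiceB = 0
--         indiceA = indiceA + 1
--     return True
-- ===== SOURCE B (Python) =====
-- def juegoEnZ(pCarton):
--     n = len(pCarton)
--     for i, row in enumerate(pCarton):
--         if (i == 0 or i == 4) and any(c != "X" for c in row):
--             return False
--         j = n - 1 - i
--         if j < len(row) and row[j] != "X":
--             return False
--     return True
-- ===== Notes on version B (the rewrite author's own statement) =====
-- stated objective: simpler
-- what changed: B indexes the anti-diagonal cell directly (j = n-1-i) per row instead of scanning every cell of every row with a decrementing counter comparison; full scans remain only for rows 0 and 4.
import Mathlib
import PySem

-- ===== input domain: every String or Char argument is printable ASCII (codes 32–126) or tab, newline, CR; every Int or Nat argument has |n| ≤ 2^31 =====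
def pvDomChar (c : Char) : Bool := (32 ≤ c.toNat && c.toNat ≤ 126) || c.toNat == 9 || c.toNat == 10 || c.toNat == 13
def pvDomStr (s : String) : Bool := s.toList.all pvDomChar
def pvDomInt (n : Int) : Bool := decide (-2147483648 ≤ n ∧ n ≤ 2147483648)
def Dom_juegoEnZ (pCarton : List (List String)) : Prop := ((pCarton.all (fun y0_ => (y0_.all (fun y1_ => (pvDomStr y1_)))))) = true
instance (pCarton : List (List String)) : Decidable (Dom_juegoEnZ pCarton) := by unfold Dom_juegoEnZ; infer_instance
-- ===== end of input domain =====

-- B checks the single anti-diagonal cell per row by direct index instead of scanning every cell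
-- with a decrementing counter; full row scans remain only for rows 0 and 4 (objective: simpler).


-- ===== PORT A =====
-- inner while loop: scans row cells with indiceB, comparing against diagonalInversa
def juegoEnZ_inner (indiceA : Nat) (diag : Int) : List String → Nat → Bool
  | [], _ => true
  | c :: rest, indiceB =>
      if (indiceA == 0 || indiceA == 4) && c != "X" then false
      else if (indiceB : Int) == diag && c != "X" then false
      else juegoEnZ_inner indiceA diag rest (indiceB + 1)

-- outer while loop: decrements diagonalInversa before each row
def juegoEnZ_outer : List (List String) → Nat → Int → Bool
  | [], _, _ => true
  | row :: rest, indiceA, diag =>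
      if juegoEnZ_inner indiceA (diag - 1) row 0 then
        juegoEnZ_outer rest (indiceA + 1) (diag - 1)
      else false

def juegoEnZ (pCarton : List (List String)) : Bool :=
  juegoEnZ_outer pCarton 0 (pCarton.length : Int)

-- ===== PORT B =====
def juegoEnZ_alt_go (n : Nat) : List (List String) → Nat → Bool
  | [], _ => true
  | row :: rest, i =>
      if (i == 0 || i == 4) && row.any (fun c => c != "X") then false
      else
        let j := n - 1 - i
        if j < row.length && row.getD j "X" != "X" then false
        else juegoEnZ_alt_go n rest (i + 1)

def juegoEnZ_alt (pCarton : List (List String)) : Bool :=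
  juegoEnZ_alt_go pCarton.length pCarton 0

-- ===== PRECONDITION & SPEC =====
def Spec_juegoEnZ (pCarton : List (List String)) (out : Bool) : Prop := out = juegoEnZ_alt pCarton
instance (pCarton : List (List String)) (out : Bool) : Decidable (Spec_juegoEnZ pCarton out) := by unfold Spec_juegoEnZ; infer_instance

-- ===== CLAIM (what is proved, stated in full; the proofs are below) =====
def Claim_equal_juegoEnZ : Prop := ∀ (pCarton : List (List String)), Dom_juegoEnZ pCarton → Spec_juegoEnZ pCarton (juegoEnZ pCarton)

-- ===== LEMMAS AND PROOFS =====

-- the diagonal-cell part of A's inner scan, as a predicate on the remaining row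
def diagOK (diag : Int) (iB : Nat) (row : List String) : Bool :=
  if 0 ≤ diag - iB ∧ diag - iB < (row.length : Int) then row.getD (diag - iB).toNat "X" == "X" else true

theorem diagOK_cons (diag : Int) (iB : Nat) (c : String) (rest : List String) :
    diagOK diag iB (c :: rest) =
      ((if (iB : Int) = diag then (c == "X") else true) && diagOK diag (iB + 1) rest) := by
  unfold diagOK
  by_cases hd : (iB : Int) = diag
  · subst hd
    have h1 : (0 : Int) ≤ (iB : Int) - iB ∧ (iB : Int) - iB < ((c :: rest).length : Int) := by
      simp only [List.length_cons]; push_cast; constructor <;> omega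
    have h2 : ¬ ((0 : Int) ≤ (iB : Int) - (iB + 1 : Nat) ∧ (iB : Int) - (iB + 1 : Nat) < (rest.length : Int)) := by
      push_cast; omega
    rw [if_pos h1, if_neg h2, if_pos rfl]
    have h0 : (((iB : Int) - iB).toNat) = 0 := by omega
    rw [h0, List.getD_cons_zero]
    simp
  · rw [if_neg hd]
    by_cases hr : (0 : Int) ≤ diag - iB ∧ diag - iB < ((c :: rest).length : Int)
    · have hne : diag - iB ≠ 0 := fun h => hd (by omega)
      have hr' : (0 : Int) ≤ diag - (iB + 1 : Nat) ∧ diag - (iB + 1 : Nat) < (rest.length : Int) := by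
        simp only [List.length_cons] at hr; push_cast at hr ⊢; constructor <;> omega
      have ht : (diag - iB).toNat = (diag - (iB + 1 : Nat)).toNat + 1 := by
        push_cast; omega
      rw [if_pos hr, if_pos hr', ht, List.getD_cons_succ]
      simp
    · have hr' : ¬ ((0 : Int) ≤ diag - (iB + 1 : Nat) ∧ diag - (iB + 1 : Nat) < (rest.length : Int)) := by
        simp only [List.length_cons] at hr
        push_cast at hr ⊢; omega
      rw [if_neg hr, if_neg hr']
      simp

-- the inner scan of A equals: border-row all-X check AND the single diagonal-cell check
theorem inner_char (indiceA : Nat) (diag : Int) (row : List String) (iB : Nat) :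
    juegoEnZ_inner indiceA diag row iB =
      ((if indiceA == 0 || indiceA == 4 then row.all (fun c => c == "X") else true) &&
       diagOK diag iB row) := by
  induction row generalizing iB with
  | nil =>
    have h : ¬ ((0 : Int) ≤ diag - iB ∧ diag - iB < ((0 : Nat) : Int)) := by omega
    simp only [juegoEnZ_inner, diagOK, List.length_nil, if_neg h]
    simp
  | cons c rest ih =>
    rw [diagOK_cons]
    simp only [juegoEnZ_inner, ih (iB + 1)]
    by_cases hc : c = "X"
    · subst hc
      by_cases hb : (indiceA == 0 || indiceA == 4) = true <;> simp [hb, Bool.and_comm]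
    · by_cases hb : (indiceA == 0 || indiceA == 4) = true
      · simp [hb, hc]
      · simp only [Bool.not_eq_true] at hb
        by_cases hd : (iB : Int) = diag
        · simp [hb, hc, hd]
        · have : (((iB : Int) == diag) && (c != "X")) = false := by simp [hd]
          simp [hb, hd, this]

theorem outer_eq_alt (rows : List (List String)) (n i : Nat) (h : n = i + rows.length) :
    juegoEnZ_outer rows i ((n : Int) - i) = juegoEnZ_alt_go n rows i := by
  induction rows generalizing i with
  | nil => simp [juegoEnZ_outer, juegoEnZ_alt_go]
  | cons row rest ih =>
    simp only [juegoEnZ_outer, juegoEnZ_alt_go]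
    have hin : i < n := by simp only [List.length_cons] at h; omega
    have hdiag : ((n : Int) - i) - 1 = (n : Int) - 1 - i := by ring
    rw [hdiag, inner_char]
    have hrec : ((n : Int) - 1 - i) = ((n : Int) - (i + 1 : Nat)) := by push_cast; ring
    have ihr : juegoEnZ_outer rest (i + 1) ((n : Int) - 1 - i) = juegoEnZ_alt_go n rest (i + 1) := by
      rw [hrec]; exact ih (i + 1) (by simp at h ⊢; omega)
    -- the diagonal check with iB = 0, diag = n-1-i ≥ 0 matches B's j = n-1-i (Nat) guard
    have hj : ((n : Int) - 1 - i - (0 : Nat)) = ((n - 1 - i : Nat) : Int) := by push_cast; omega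
    have hdOK : diagOK ((n : Int) - 1 - i) 0 row =
        (if (n - 1 - i < row.length) then row.getD (n - 1 - i) "X" == "X" else true) := by
      unfold diagOK
      rw [hj]
      by_cases hlt : n - 1 - i < row.length
      · rw [if_pos (by constructor <;> [positivity; exact_mod_cast hlt]), if_pos hlt]
        rw [Int.toNat_natCast]
      · rw [if_neg (by push_cast; omega), if_neg hlt]
    rw [hdOK]
    by_cases hb : (i == 0 || i == 4) = true
    · by_cases hall : row.all (fun c => c == "X") = true
      · have hany : row.any (fun c => c != "X") = false := by
          rw [List.any_eq_false]
          intro x hx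
          have hxX := List.all_eq_true.mp hall x hx
          simp at hxX ⊢; exact hxX
        simp only [hb, if_pos, hall, Bool.true_and, hany, Bool.and_false, Bool.false_eq_true,
          if_neg (Bool.false_ne_true)]
        by_cases hlt : n - 1 - i < row.length
        · by_cases hx : row.getD (n - 1 - i) "X" = "X"
          · simp [hlt, hx, ihr]
          · simp [hlt, ihr]
        · simp [hlt, ihr]
      · have hany : row.any (fun c => c != "X") = true := by
          rw [List.any_eq_true]
          obtain ⟨x, hx, hpx⟩ := List.all_eq_false.mp (Bool.eq_false_iff.mpr hall)
          exact ⟨x, hx, by simp at hpx ⊢; exact hpx⟩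
        simp [hb, hall, hany]
    · simp only [Bool.not_eq_true] at hb
      simp only [hb, if_neg (Bool.false_ne_true), Bool.true_and, Bool.false_and,
        Bool.false_eq_true, if_neg (Bool.false_ne_true)]
      by_cases hlt : n - 1 - i < row.length
      · by_cases hx : row.getD (n - 1 - i) "X" = "X"
        · simp [hlt, hx, ihr]
        · simp [hlt, hx, ihr]
      · simp [hlt, ihr]

-- ===== VERDICT (by name: the statement is the Claim_ definition above) =====
theorem juegoEnZ_spec : Claim_equal_juegoEnZ := by
  intro pCarton _
  unfold Spec_juegoEnZ juegoEnZ juegoEnZ_alt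
  have := outer_eq_alt pCarton pCarton.length 0 (by simp)
  simpa using this
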